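-- pv_equiv track=rewrite | github.com/VRAXION/VRAXION | Diamond Code/swarm_model.py | fibonacci_tick_periods
-- ===== SOURCE A (Python) =====
-- def fibonacci_tick_periods(k_values: list = None, num_beings: int = 0) -> list:
--     """Map K values (or being indices) to Fibonacci tick periods.
--
--     Larger K -> longer period (fires less often, thinks deeply).
--     Smaller K -> period=1 (fires every tick, vibrates fast).
--
--     Args:
--         k_values: List of K values per being (from fibonacci_k_schedule).
--                   If None, uses num_beings with cycling fibonacci assignment.
--         num_beings: Number of beings (used when k_values is None for flat swarm).
--
--     Returns:
--         List of tick periods, one per being. Period N means "fire every N ticks".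
--     """
--     FIB = [1, 1, 2, 3, 5, 8, 13, 21, 34, 55, 89]
--
--     if k_values is not None:
--         unique_ks = sorted(set(k_values), reverse=True)  # largest first
--         n = len(unique_ks)
--         # Largest K -> largest fib period, smallest K -> period 1
--         fib_map = [FIB[min(i + 1, len(FIB) - 1)] for i in range(n)]  # ascending: [1,2,3,5,8,13,21,...]
--         k_to_period = {k: fib_map[n - 1 - i] for i, k in enumerate(unique_ks)}
--         return [k_to_period[k] for k in k_values]
--     else:
--         # Flat swarm: cycle fibonacci by being index
--         n = min(num_beings, len(FIB))
--         return [FIB[min((num_beings - 1 - i) % n + 1, len(FIB) - 1)] for i in range(num_beings)]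
-- ===== SOURCE B (Python) =====
-- def fibonacci_tick_periods(k_values: list = None, num_beings: int = 0) -> list:
--     """Map K values (or being indices) to Fibonacci tick periods.
--
--     Rank each K directly: its period is FIB[rank+1] (clamped), where rank is
--     the number of distinct K values strictly below it -- no sort, no rank table.
--     """
--     FIB = [1, 1, 2, 3, 5, 8, 13, 21, 34, 55, 89]
--
--     if k_values is not None:
--         distinct = set(k_values)
--         return [FIB[min(sum(1 for v in distinct if v < k) + 1, len(FIB) - 1)]
--                 for k in k_values]
--     else:
--         n = min(num_beings, len(FIB))
--         return [FIB[min((num_beings - 1 - i) % n + 1, len(FIB) - 1)] for i in range(num_beings)]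
-- ===== Notes on version B (the rewrite author's own statement) =====
-- stated objective: simpler
-- what changed: The k_values branch drops the descending sort, the fib_map table and the k->period dict: each element's period is computed directly as FIB[min(rank+1, 10)] with rank = number of distinct values strictly below it.
import Mathlib
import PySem

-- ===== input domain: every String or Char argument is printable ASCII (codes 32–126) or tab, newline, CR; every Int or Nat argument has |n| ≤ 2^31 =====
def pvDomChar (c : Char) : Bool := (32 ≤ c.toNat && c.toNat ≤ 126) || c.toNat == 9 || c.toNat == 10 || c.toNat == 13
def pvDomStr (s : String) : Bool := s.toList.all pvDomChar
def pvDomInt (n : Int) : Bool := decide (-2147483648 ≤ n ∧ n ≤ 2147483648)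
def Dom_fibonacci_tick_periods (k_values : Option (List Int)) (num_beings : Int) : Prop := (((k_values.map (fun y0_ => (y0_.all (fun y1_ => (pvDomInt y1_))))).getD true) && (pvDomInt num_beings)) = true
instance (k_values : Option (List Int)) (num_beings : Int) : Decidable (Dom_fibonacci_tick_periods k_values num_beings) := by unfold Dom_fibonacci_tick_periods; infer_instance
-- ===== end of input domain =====

-- B drops A's sort + fib_map table + rank dict: each element's period is FIB[min(rank+1,10)]
-- with rank = number of distinct values strictly below it (objective: simpler).

def pvFIB : List Int := [1, 1, 2, 3, 5, 8, 13, 21, 34, 55, 89]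

-- ===== PORT A =====
def fibonacci_tick_periods (k_values : Option (List Int)) (num_beings : Int) : List Int :=
  match k_values with
  | some ks =>
      let unique_ks := PySem.List.sorted (PySem.Set.ofList ks) (fun x => x) true
      let n := unique_ks.length
      let fib_map := (PySem.List.pyRange 0 (n : Int) 1).map
        (fun i => PySem.List.pyGetD pvFIB (min (i + 1) 10) 0)
      let k_to_period := (PySem.List.enumerate unique_ks 0).foldl
        (fun d p => d.insert p.2 (PySem.List.pyGetD fib_map ((n : Int) - 1 - p.1) 0))
        PySem.Dict.empty
      ks.map (fun k => (k_to_period.get? k).getD 0)   -- KeyError impossible: every k is in the dict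
  | none =>
      let n := min num_beings 11
      (PySem.List.pyRange 0 num_beings 1).map
        (fun i => PySem.List.pyGetD pvFIB (min (PySem.Int.mod (num_beings - 1 - i) n + 1) 10) 0)

-- ===== PORT B =====
def fibonacci_tick_periods_alt (k_values : Option (List Int)) (num_beings : Int) : List Int :=
  match k_values with
  | some ks =>
      let distinct := PySem.Set.ofList ks
      ks.map (fun k =>
        PySem.List.pyGetD pvFIB
          (min ((distinct.foldl (fun acc v => acc + if v < k then 1 else 0) (0 : Int)) + 1) 10) 0)
  | none =>
      let n := min num_beings 11
      (PySem.List.pyRange 0 num_beings 1).map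
        (fun i => PySem.List.pyGetD pvFIB (min (PySem.Int.mod (num_beings - 1 - i) n + 1) 10) 0)

-- ===== PRECONDITION & SPEC =====
def Spec_fibonacci_tick_periods (k_values : Option (List Int)) (num_beings : Int) (out : List Int) : Prop := out = fibonacci_tick_periods_alt k_values num_beings
instance (k_values : Option (List Int)) (num_beings : Int) (out : List Int) : Decidable (Spec_fibonacci_tick_periods k_values num_beings out) := by unfold Spec_fibonacci_tick_periods; infer_instance

-- ===== CLAIM (what is proved, stated in full; the proofs are below) =====
def Claim_equal_fibonacci_tick_periods : Prop := ∀ (k_values : Option (List Int)) (num_beings : Int), Dom_fibonacci_tick_periods k_values num_beings → Spec_fibonacci_tick_periods k_values num_beings (fibonacci_tick_periods k_values num_beings)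

-- ===== LEMMAS AND PROOFS =====

-- Folding inserts over keys not equal to k leaves d.get? k unchanged.
theorem pv_get?_foldl_not_mem (L : List (Int × Int)) (d : PySem.Dict Int Int) (k : Int)
    (h : ∀ p ∈ L, p.2 ≠ k) (g : Int × Int → Int) :
    ((L.foldl (fun d p => d.insert p.2 (g p)) d).get? k) = d.get? k := by
  induction L generalizing d with
  | nil => rfl
  | cons x t ih =>
      simp only [List.foldl_cons]
      rw [ih _ (fun p hp => h p (List.mem_cons_of_mem _ hp))]
      exact PySem.Dict.get?_insert_of_ne d (g x) (Ne.symm (h x List.mem_cons_self))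

-- Looking k up in the dict A builds from 'enumerate unique_ks' yields the value at k's index.
theorem pv_dict_fold_get (L : List Int) (g : Int × Int → Int) (s : Int) (d : PySem.Dict Int Int)
    (k : Int) (hk : k ∈ L) (hnd : L.Nodup) :
    ((PySem.List.enumerate L s).foldl (fun d p => d.insert p.2 (g p)) d).get? k
      = some (g (s + (L.idxOf k : Int), k)) := by
  induction L generalizing s d with
  | nil => cases hk
  | cons x t ih =>
      rw [PySem.List.enumerate_cons]
      simp only [List.foldl_cons]
      by_cases hkx : k = x
      · subst hkx
        have hnot : k ∉ t := (List.nodup_cons.mp hnd).1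
        rw [pv_get?_foldl_not_mem _ _ _ ?_ g]
        · rw [PySem.Dict.get?_insert_self]
          simp [List.idxOf_cons_self]
        · intro p hp he
          have hmem : p.2 ∈ t := by
            have hm := PySem.List.map_snd_enumerate t (s + 1)
            exact hm ▸ List.mem_map_of_mem hp
          exact hnot (he ▸ hmem)
      · have hkt : k ∈ t := by
          rcases List.mem_cons.mp hk with h | h
          · exact absurd h hkx
          · exact h
        rw [ih _ _ hkt (List.nodup_cons.mp hnd).2]
        have hxk : x ≠ k := fun h => hkx h.symm
        have hidx : List.idxOf k (x :: t) = List.idxOf k t + 1 := by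
          simp [hxk]
        have harg : (s + 1 + (List.idxOf k t : Int), k)
            = (s + ((List.idxOf k t + 1 : Nat) : Int), k) := by
          rw [Prod.mk.injEq]
          exact ⟨by push_cast; ring, rfl⟩
        rw [hidx, harg]

-- In a strictly descending list, the values below a member m form exactly the suffix after m.
theorem pv_countP_lt_desc (L : List Int) (hL : L.Pairwise (· > ·)) (m : Int) (hm : m ∈ L) :
    L.countP (fun v => decide (v < m)) = L.length - 1 - L.idxOf m := by
  induction L with
  | nil => cases hm
  | cons x t ih =>
      have hpair := List.pairwise_cons.mp hL
      by_cases hmx : m = x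
      · subst hmx
        have hlen : t.countP (fun v => decide (v < m)) = t.length :=
          List.countP_eq_length.mpr (fun v hv => decide_eq_true (hpair.1 v hv))
        simp only [List.countP_cons, hlen, List.idxOf_cons_self, List.length_cons]
        simp
      · have hmt : m ∈ t := by
          rcases List.mem_cons.mp hm with h | h
          · exact absurd h hmx
          · exact h
        have hxm : x ≠ m := fun h => hmx h.symm
        have hidx : List.idxOf m (x :: t) = List.idxOf m t + 1 := by
          simp [hxm]
        have hxnot : decide (x < m) = false := by
          simp [not_lt.mpr (le_of_lt (hpair.1 m hmt))]
        have hil : List.idxOf m t < t.length := List.idxOf_lt_length_of_mem hmt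
        simp only [List.countP_cons, hxnot, hidx, List.length_cons]
        rw [ih hpair.2 hmt]
        simp only [Bool.false_eq_true, if_false]
        omega

-- The per-element agreement: A's dict lookup equals B's direct count, for k ∈ ks.
theorem pv_point (ks : List Int) (k : Int) (hk : k ∈ ks) :
    (((PySem.List.enumerate (PySem.List.sorted (PySem.Set.ofList ks) (fun x => x) true) 0).foldl
        (fun d p => d.insert p.2
          (PySem.List.pyGetD
            ((PySem.List.pyRange 0 ((PySem.List.sorted (PySem.Set.ofList ks) (fun x => x) true).length : Int) 1).map
              (fun i => PySem.List.pyGetD pvFIB (min (i + 1) 10) 0))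
            (((PySem.List.sorted (PySem.Set.ofList ks) (fun x => x) true).length : Int) - 1 - p.1) 0))
        PySem.Dict.empty).get? k).getD 0
      = PySem.List.pyGetD pvFIB
          (min (((PySem.Set.ofList ks).foldl (fun acc v => acc + if v < k then 1 else 0) (0 : Int)) + 1) 10) 0 := by
  set u := PySem.List.sorted (PySem.Set.ofList ks) (fun x => x) true with hu
  have hperm : u.Perm (PySem.Set.ofList ks) := PySem.List.sorted_perm _ _ _
  have hnd : u.Nodup := hperm.nodup_iff.mpr (PySem.Set.nodup_ofList ks)
  have hdesc : u.Pairwise (· > ·) := by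
    have h1 : u.Pairwise (fun a b : Int => b ≤ a) := PySem.List.sorted_pairwise_rev _ _
    have h2 : u.Pairwise (· ≠ ·) := hnd
    exact (h1.and h2).imp (fun ⟨hle, hne⟩ => lt_of_le_of_ne hle (Ne.symm hne))
  have hku : k ∈ u := by
    rw [hu, PySem.List.mem_sorted]
    exact (PySem.Set.mem_ofList ks k).mpr hk
  have hidx : u.idxOf k < u.length := List.idxOf_lt_length_of_mem hku
  rw [pv_dict_fold_get u
      (fun p => PySem.List.pyGetD
        ((PySem.List.pyRange 0 (u.length : Int) 1).map
          (fun i => PySem.List.pyGetD pvFIB (min (i + 1) 10) 0))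
        ((u.length : Int) - 1 - p.1) 0) 0 PySem.Dict.empty k hku hnd]
  simp only [Option.getD_some, zero_add]
  have hnn : (0 : Int) ≤ (u.length : Int) - 1 - (u.idxOf k : Int) := by
    have := hidx; omega
  have hlt : (u.length : Int) - 1 - (u.idxOf k : Int) < (u.length : Int) := by
    have := hidx; omega
  rw [PySem.List.pyGetD_map_pyRange_of_nonneg _ _ _ _ hnn hlt]
  have hmap : List.map (fun v => if v < k then (1 : Int) else 0) (PySem.Set.ofList ks)
      = List.map (fun v => if decide (v < k) = true then (1 : Int) else 0) (PySem.Set.ofList ks) := by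
    simp
  have hcnt : ((PySem.Set.ofList ks).foldl (fun acc v => acc + if v < k then 1 else 0) (0 : Int))
      = ((PySem.Set.ofList ks).countP (fun v => decide (v < k)) : Int) := by
    rw [PySem.List.foldl_add (PySem.Set.ofList ks) (fun v => if v < k then 1 else 0) 0, hmap,
      PySem.List.sum_map_ite_one_zero]
    ring
  have hcnt2 : (PySem.Set.ofList ks).countP (fun v => decide (v < k))
      = u.countP (fun v => decide (v < k)) := (hperm.countP_eq _).symm
  have hcdesc := pv_countP_lt_desc u hdesc k hku
  have hfold : ((PySem.Set.ofList ks).foldl (fun acc v => acc + if v < k then 1 else 0) (0 : Int))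
      = (u.length : Int) - 1 - (u.idxOf k : Int) := by
    rw [hcnt, hcnt2, hcdesc]
    have := hidx; omega
  rw [hfold]

-- ===== VERDICT (by name: the statement is the Claim_ definition above) =====
theorem fibonacci_tick_periods_spec : Claim_equal_fibonacci_tick_periods := by
  intro k_values num_beings _
  unfold Spec_fibonacci_tick_periods fibonacci_tick_periods fibonacci_tick_periods_alt
  cases k_values with
  | none => rfl
  | some ks =>
      simp only
      exact List.map_congr_left (fun k hk => pv_point ks k hk)
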